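-- pv_equiv track=rewrite | github.com/RunestoneInteractive/rs | bases/rsptx/book_server_api/routers/personalized_parsons/generate_parsons_blocks.py | keep_last_hash_tag_lines
-- ===== SOURCE A (Python) =====
-- def keep_last_hash_tag_lines(input_string, hash_tag):
--     """
--     Keep only the last occurrence of a specific hash tag in each line of the input string.
--     """
--     lines = input_string.split("\n")
--     output_lines = []
--     found_last_settled = False
--     for line in reversed(lines):
--         if (hash_tag in line) & (not found_last_settled):
--             output_lines.append(line)
--             found_last_settled = True
--         elif (hash_tag in line) & (found_last_settled == True):
--             line = line.replace(hash_tag, "")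
--             output_lines.append(line)
--         else:
--             output_lines.append(line)
--     return "\n".join(reversed(output_lines))
-- ===== SOURCE B (Python) =====
-- def keep_last_hash_tag_lines(input_string, hash_tag):
--     """
--     Keep only the last occurrence of a specific hash tag in each line of the input string.
--     """
--     lines = input_string.split("\n")
--     last = -1
--     for i, line in enumerate(lines):
--         if hash_tag in line:
--             last = i
--     out = []
--     for i, line in enumerate(lines):
--         if i == last or hash_tag not in line:
--             out.append(line)
--         else:
--             out.append(line.replace(hash_tag, ""))
--     return "\n".join(out)
-- ===== Notes on version B (the rewrite author's own statement) =====
-- stated objective: alternative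
-- what changed: Replaces the reverse iteration with a running 'settled' flag by two forward passes: first locate the index of the last line containing the tag, then rebuild every line in order, keeping the located line and stripping the tag elsewhere.
import Mathlib
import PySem

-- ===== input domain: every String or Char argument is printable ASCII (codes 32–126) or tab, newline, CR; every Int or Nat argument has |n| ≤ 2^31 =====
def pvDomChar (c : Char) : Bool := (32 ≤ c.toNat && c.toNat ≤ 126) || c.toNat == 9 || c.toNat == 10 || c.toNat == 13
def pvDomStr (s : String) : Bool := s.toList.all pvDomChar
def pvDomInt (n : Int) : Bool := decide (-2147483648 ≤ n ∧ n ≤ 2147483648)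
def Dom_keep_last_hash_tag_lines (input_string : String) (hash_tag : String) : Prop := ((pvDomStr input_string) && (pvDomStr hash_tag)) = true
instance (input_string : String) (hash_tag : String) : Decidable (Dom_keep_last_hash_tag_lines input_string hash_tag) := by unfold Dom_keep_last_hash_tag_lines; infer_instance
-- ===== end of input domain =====

-- B replaces A's reverse iteration with a 'settled' flag by locate-the-last-tagged-line then a single forward rebuild (alternative decomposition, same cost).

-- ===== PORT A =====
-- s.split("\n"): split? is none only for sep = "", and "\n" ≠ "", so .getD [] is exact here
def keep_last_hash_tag_lines (input_string : String) (hash_tag : String) : String :=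
  let lines := (PySem.Str.split? input_string "\n").getD []
  let st := lines.reverse.foldl (fun (st : List String × Bool) line =>
      if PySem.Str.isIn hash_tag line && !st.2 then
        (st.1 ++ [line], true)
      else if PySem.Str.isIn hash_tag line && (st.2 == true) then
        (st.1 ++ [PySem.Str.replace line hash_tag ""], st.2)
      else
        (st.1 ++ [line], st.2)) ([], false)
  PySem.Str.join "\n" st.1.reverse

-- ===== PORT B =====
def keep_last_hash_tag_lines_alt (input_string : String) (hash_tag : String) : String :=
  let lines := (PySem.Str.split? input_string "\n").getD []
  let last := (PySem.List.enumerate lines 0).foldl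
      (fun acc q => if PySem.Str.isIn hash_tag q.2 then q.1 else acc) (-1 : Int)
  let out := (PySem.List.enumerate lines 0).map
      (fun q => if q.1 == last || !(PySem.Str.isIn hash_tag q.2) then q.2
                else PySem.Str.replace q.2 hash_tag "")
  PySem.Str.join "\n" out

-- ===== PRECONDITION & SPEC =====
def Spec_keep_last_hash_tag_lines (input_string : String) (hash_tag : String) (out : String) : Prop := out = keep_last_hash_tag_lines_alt input_string hash_tag
instance (input_string : String) (hash_tag : String) (out : String) : Decidable (Spec_keep_last_hash_tag_lines input_string hash_tag out) := by unfold Spec_keep_last_hash_tag_lines; infer_instance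

-- ===== CLAIM (what is proved, stated in full; the proofs are below) =====
def Claim_equal_keep_last_hash_tag_lines : Prop := ∀ (input_string : String) (hash_tag : String), Dom_keep_last_hash_tag_lines input_string hash_tag → Spec_keep_last_hash_tag_lines input_string hash_tag (keep_last_hash_tag_lines input_string hash_tag)

-- ===== LEMMAS AND PROOFS =====

-- A's loop body as a pure function over the (already reversed) lines; the Bool is the 'settled' flag.
def pvGA (p : String → Bool) (f : String → String) : List String → Bool → List String
  | [], _ => []
  | l :: ls, b =>
      (if p l && !b then l else if p l && (b == true) then f l else l) :: pvGA p f ls (b || p l)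

-- common characterisation, in original line order; b = 'a tagged line occurs after all of these'
def pvCore (p : String → Bool) (f : String → String) (b : Bool) : List String → List String
  | [] => []
  | l :: ls => (if p l then (if b || ls.any p then f l else l) else l) :: pvCore p f b ls

-- greatest offset of a line satisfying p; meaningful only when some line satisfies p
def pvIdxLast (p : String → Bool) : List String → Int
  | [] => 0
  | _ :: ls => if ls.any p then 1 + pvIdxLast p ls else 0

theorem pvIdxLast_nonneg (p : String → Bool) (ls : List String) : 0 ≤ pvIdxLast p ls := by
  induction ls with
  | nil => simp [pvIdxLast]
  | cons l ls ih => simp only [pvIdxLast]; split_ifs <;> omega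

theorem pvA_fold (p : String → Bool) (f : String → String) (ls : List String) :
    ∀ (acc : List String) (b : Bool),
    ls.foldl (fun (st : List String × Bool) line =>
      if p line && !st.2 then (st.1 ++ [line], true)
      else if p line && (st.2 == true) then (st.1 ++ [f line], st.2)
      else (st.1 ++ [line], st.2)) (acc, b)
    = (acc ++ pvGA p f ls b, b || ls.any p) := by
  induction ls with
  | nil => simp [pvGA]
  | cons l ls ih =>
    intro acc b
    have hstep : (if p l && !(acc, b).2 then ((acc, b).1 ++ [l], true)
        else if p l && ((acc, b).2 == true) then ((acc, b).1 ++ [f l], (acc, b).2)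
        else ((acc, b).1 ++ [l], (acc, b).2))
        = (acc ++ [if p l && !b then l else if p l && (b == true) then f l else l], b || p l) := by
      cases hp : p l <;> cases b <;> simp [hp]
    rw [List.foldl_cons, hstep, ih]
    simp [pvGA, Bool.or_assoc]

theorem pvGA_append (p : String → Bool) (f : String → String) (xs ys : List String) :
    ∀ b, pvGA p f (xs ++ ys) b = pvGA p f xs b ++ pvGA p f ys (b || xs.any p) := by
  induction xs with
  | nil => simp [pvGA]
  | cons x xs ih =>
    intro b
    simp [pvGA, ih, Bool.or_assoc]

theorem pvGA_reverse (p : String → Bool) (f : String → String) (lines : List String) (b : Bool) :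
    (pvGA p f lines.reverse b).reverse = pvCore p f b lines := by
  induction lines with
  | nil => simp [pvGA, pvCore]
  | cons l ls ih =>
    rw [List.reverse_cons, pvGA_append]
    simp only [List.reverse_append, List.any_reverse]
    cases hp : p l <;> cases hb : b <;> cases ha : ls.any p <;>
      simp_all [pvGA, pvCore]

theorem pvB_last (p : String → Bool) (ls : List String) :
    ∀ (s acc : Int),
    (PySem.List.enumerate ls s).foldl (fun acc q => if p q.2 then q.1 else acc) acc
      = if ls.any p then s + pvIdxLast p ls else acc := by
  induction ls with
  | nil => intro s acc; simp [PySem.List.enumerate_nil]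
  | cons l ls ih =>
    intro s acc
    rw [PySem.List.enumerate_cons]
    simp only [List.foldl_cons, List.any_cons, pvIdxLast]
    cases hp : p l <;> cases ha : ls.any p <;> simp [ih, ha] <;> omega

theorem pv_map_no_tag (p : String → Bool) (f : String → String) (ls : List String) :
    ∀ (s last : Int), ls.any p = false →
    (PySem.List.enumerate ls s).map
        (fun q => if q.1 == last || !(p q.2) then q.2 else f q.2)
      = pvCore p f false ls := by
  induction ls with
  | nil => intro s last _; simp [PySem.List.enumerate_nil, pvCore]
  | cons x xs ih =>
    intro s last h
    simp only [List.any_cons, Bool.or_eq_false_iff] at h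
    rw [PySem.List.enumerate_cons, List.map_cons, ih (s+1) last h.2]
    simp [pvCore, h.1]

theorem pvB_map (p : String → Bool) (f : String → String) (ls : List String) :
    ∀ (s last : Int), (ls.any p = true → last = s + pvIdxLast p ls) →
    (PySem.List.enumerate ls s).map
        (fun q => if q.1 == last || !(p q.2) then q.2 else f q.2)
      = pvCore p f false ls := by
  induction ls with
  | nil => intro s last _; simp [PySem.List.enumerate_nil, pvCore]
  | cons l ls ih =>
    intro s last hlast
    rw [PySem.List.enumerate_cons]
    simp only [List.map_cons]
    cases ha : ls.any p
    · have htail := pv_map_no_tag p f ls (s+1) last ha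
      rw [htail]
      cases hp : p l
      · simp [pvCore, hp, ha]
      · have hl : last = s := by
          have := hlast (by simp [hp])
          simpa [pvIdxLast, ha] using this
        subst hl
        simp [pvCore, hp, ha]
    · have hl : last = s + pvIdxLast p (l :: ls) := hlast (by simp [ha])
      have hidx : pvIdxLast p (l :: ls) = 1 + pvIdxLast p ls := by simp [pvIdxLast, ha]
      have hnn := pvIdxLast_nonneg p ls
      have hne : (s == last) = false := by
        rw [beq_eq_false_iff_ne]
        omega
      have htail := ih (s+1) last (fun _ => by rw [hl, hidx]; ring)
      rw [htail]
      cases hp : p l <;> simp [pvCore, hp, ha, hne]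

theorem keep_last_eq (input_string tag : String) :
    keep_last_hash_tag_lines input_string tag = keep_last_hash_tag_lines_alt input_string tag := by
  simp only [keep_last_hash_tag_lines, keep_last_hash_tag_lines_alt]
  rw [pvA_fold (PySem.Str.isIn tag) (fun line => PySem.Str.replace line tag "")]
  rw [pvB_last (PySem.Str.isIn tag)]
  simp only [List.nil_append]
  rw [pvGA_reverse]
  rw [pvB_map (PySem.Str.isIn tag) (fun line => PySem.Str.replace line tag "")
      _ 0 _ (fun h => by simp [h])]

-- ===== VERDICT (by name: the statement is the Claim_ definition above) =====
theorem keep_last_hash_tag_lines_spec : Claim_equal_keep_last_hash_tag_lines := by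
  intro input_string hash_tag _
  unfold Spec_keep_last_hash_tag_lines
  exact keep_last_eq input_string hash_tag
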